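-- pv_equiv track=rewrite | github.com/Gr33nMax/Python-CodeWars | format_str_names.py | namelist
-- ===== SOURCE A (Python) =====
-- def namelist(names):
--     # recursive implementation
--     result_str = str()
--     if not names:
--         return result_str
--     elif len(names) == 1:
--         return names[0]['name']
--     else:
--         if len(names[1:]) == 1:
--             return names[0]['name'] + ' & ' + namelist(names[1:])
--         else:
--             return names[0]['name'] + ', ' + namelist(names[1:])
-- ===== SOURCE B (Python) =====
-- def namelist(names):
--     parts = [n['name'] for n in names]
--     if not parts:
--         return ''
--     if len(parts) == 1:
--         return parts[0]
--     return ', '.join(parts[:-1]) + ' & ' + parts[-1]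
-- ===== Notes on version B (the rewrite author's own statement) =====
-- stated objective: simpler
-- what changed: B replaces A's tail recursion that peels one name per call (re-testing the suffix length at each level) with a single closed-form expression: extract the name strings once, then ', '.join on all but the last plus ' & ' plus the last.
import Mathlib
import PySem

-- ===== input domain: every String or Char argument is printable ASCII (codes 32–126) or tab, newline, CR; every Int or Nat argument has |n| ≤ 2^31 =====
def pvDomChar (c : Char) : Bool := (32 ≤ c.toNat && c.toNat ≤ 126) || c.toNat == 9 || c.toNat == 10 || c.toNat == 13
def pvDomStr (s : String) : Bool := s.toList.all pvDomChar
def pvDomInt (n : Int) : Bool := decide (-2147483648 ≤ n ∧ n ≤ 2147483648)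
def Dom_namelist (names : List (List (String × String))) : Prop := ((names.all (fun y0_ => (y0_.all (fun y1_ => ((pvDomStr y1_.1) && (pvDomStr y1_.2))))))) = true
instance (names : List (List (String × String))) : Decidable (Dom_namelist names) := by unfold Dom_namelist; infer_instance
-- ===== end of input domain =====

-- B replaces A's recursion over the suffix with one closed-form slice-and-join expression (objective: simpler).

-- ===== PORT A =====
-- n['name']: first-match lookup in the association list ("" only outside Pre_, where Python raises KeyError)
def pvName (n : List (String × String)) : String :=
  ((n.find? (fun p => p.1 == "name")).map (·.2)).getD ""

def namelist (names : List (List (String × String))) : String :=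
  match names with
  | [] => ""
  | n :: rest =>
    if rest.length = 0 then pvName n
    else if rest.length = 1 then pvName n ++ " & " ++ namelist rest
    else pvName n ++ ", " ++ namelist rest

-- ===== PORT B =====
def namelist_alt (names : List (List (String × String))) : String :=
  let parts := names.map pvName
  if parts = [] then ""
  else if parts.length = 1 then PySem.List.pyGetD parts 0 ""
  else PySem.Str.join ", " (PySem.List.slice parts none (some (-1))) ++ " & " ++ PySem.List.pyGetD parts (-1) ""

-- ===== PRECONDITION & SPEC =====
-- Pre_ excludes inputs where some dict lacks the key 'name': there Python A raises KeyError.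
def Pre_namelist (names : List (List (String × String))) : Prop :=
  (names.all (fun n => n.any (fun p => p.1 == "name"))) = true
instance (names : List (List (String × String))) : Decidable (Pre_namelist names) := by unfold Pre_namelist; infer_instance
def pvWitness_namelist : (List (List (String × String))) := [[("name", "Alice")], [("name", "Bob")]]

def Spec_namelist (names : List (List (String × String))) (out : String) : Prop := out = namelist_alt names
instance (names : List (List (String × String))) (out : String) : Decidable (Spec_namelist names out) := by unfold Spec_namelist; infer_instance

-- ===== CLAIM (what is proved, stated in full; the proofs are below) =====
def Claim_equal_namelist : Prop := ∀ (names : List (List (String × String))), Dom_namelist names → Pre_namelist names → Spec_namelist names (namelist names)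

-- ===== LEMMAS AND PROOFS =====

-- A on two or more names = join of all but the last, then " & ", then the last
theorem namelist_eq_join (n m : List (String × String)) (rest : List (List (String × String))) :
    namelist (n :: m :: rest) =
      PySem.Str.join ", " ((List.map pvName (n :: m :: rest)).dropLast) ++ " & " ++
        pvName ((m :: rest).getLast (by simp)) := by
  induction rest generalizing n m with
  | nil =>
    show pvName n ++ " & " ++ namelist [m] = _
    apply String.ext
    simp [namelist, PySem.Str.join]
  | cons r rs ih =>
    have h := ih m r
    show (if (m :: r :: rs).length = 0 then pvName n
          else if (m :: r :: rs).length = 1 then pvName n ++ " & " ++ namelist (m :: r :: rs)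
          else pvName n ++ ", " ++ namelist (m :: r :: rs)) = _
    rw [if_neg (by simp), if_neg (by simp), h]
    have hlast : (m :: r :: rs).getLast (by simp) = (r :: rs).getLast (by simp) := by
      simp [List.getLast]
    rw [hlast]
    apply String.ext
    simp only [List.map_cons, List.dropLast, String.toList_append, PySem.Str.toList_join,
      List.map_cons]
    rw [PySem.Chars.join_cons_cons]
    simp [List.append_assoc]

theorem slice_neg_one_eq_dropLast (xs : List String) (h : xs ≠ []) :
    PySem.List.slice xs none (some (-1)) = xs.dropLast := by
  have hl : 0 < xs.length := List.length_pos_iff.mpr h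
  simp [PySem.List.slice, PySem.List.clampIdx, List.dropLast_eq_take, h]
  omega

theorem pyGetD_neg_one_eq_getLast (xs : List String) (h : xs ≠ []) :
    PySem.List.pyGetD xs (-1) "" = xs.getLast h := by
  have hl : 0 < xs.length := List.length_pos_iff.mpr h
  rw [PySem.List.pyGetD]
  simp [PySem.List.pyGet?, PySem.List.pyIdx?, List.getLast_eq_getElem]
  rw [if_pos (by omega)]
  simp [List.getElem?_eq_getElem (show xs.length - 1 < xs.length by omega)]

theorem namelist_spec : Claim_equal_namelist := by
  intro names _ _
  unfold Spec_namelist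
  match names with
  | [] => rfl
  | [n] => rfl
  | n :: m :: rest =>
    rw [namelist_eq_join]
    show _ = (if List.map pvName (n :: m :: rest) = [] then "" else _)
    rw [if_neg (by simp), if_neg (by simp),
      slice_neg_one_eq_dropLast _ (by simp),
      pyGetD_neg_one_eq_getLast _ (by simp)]
    congr 1
    simp [List.getLast_eq_getElem]
    exact (List.getElem_map (f := pvName) (l := m :: rest)).symm
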